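-- pv_equiv track=rewrite | github.com/Aasthaengg/IBMdataset | Python_codes/p02266/s609291728.py | hightMapGenerator
-- ===== SOURCE A (Python) =====
-- def hightMapGenerator(text):
--     height_map = []
--     current_height = 0
--     for letter in text:
--         if letter == '\\':
--             current_height -= 1
--         elif letter == '/':
--             current_height += 1
--         else :
--             pass
--         height_map.append(current_height)
--     return height_map
-- ===== SOURCE B (Python) =====
-- def hightMapGenerator(text):
--     running = text.count('/') - text.count('\\')
--     rev = []
--     for c in reversed(text):
--         rev.append(running)
--         if c == '/':
--             running -= 1
--         elif c == '\\':
--             running += 1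
--     rev.reverse()
--     return rev
-- ===== Notes on version B (the rewrite author's own statement) =====
-- stated objective: alternative
-- what changed: Instead of A's forward loop accumulating a running height, B computes the final total height once via str.count('/') - str.count('\\') and then constructs the list back-to-front over the reversed text, un-doing each character's delta, reversing the built list at the end.
import Mathlib
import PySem

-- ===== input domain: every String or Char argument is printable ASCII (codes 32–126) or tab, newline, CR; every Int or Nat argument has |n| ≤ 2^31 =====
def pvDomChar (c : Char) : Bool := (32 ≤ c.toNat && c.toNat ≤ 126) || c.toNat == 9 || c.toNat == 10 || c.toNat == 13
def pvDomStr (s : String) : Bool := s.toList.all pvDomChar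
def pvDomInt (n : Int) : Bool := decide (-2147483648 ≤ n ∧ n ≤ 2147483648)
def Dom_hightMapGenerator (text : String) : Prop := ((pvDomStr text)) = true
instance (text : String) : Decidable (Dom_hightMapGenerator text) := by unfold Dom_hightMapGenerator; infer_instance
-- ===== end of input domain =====

-- B computes the global total first via str.count and then builds the height list back-to-front, un-doing each character's delta, reversing at the end (alternative algorithm; same O(n) cost).


-- ===== PORT A =====
-- literal port of A: one forward loop carrying (height_map, current_height), appending after each letter
def hightMapGenerator (text : String) : List Int :=
  (text.toList.foldl
    (fun (st : List Int × Int) letter =>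
      let h := if letter = '\\' then st.2 - 1 else if letter = '/' then st.2 + 1 else st.2
      (st.1 ++ [h], h))
    ([], 0)).1

-- ===== PORT B =====
-- literal port of B: running := count('/') - count('\\'); loop over reversed text appending running
-- and un-doing the current character's delta; finally reverse the built list.
def hightMapGenerator_alt (text : String) : List Int :=
  let running : Int := (PySem.Str.count text "/" : Int) - (PySem.Str.count text "\\" : Int)
  let st := text.toList.reverse.foldl
    (fun (st : List Int × Int) c =>
      (st.1 ++ [st.2],
       if c = '/' then st.2 - 1 else if c = '\\' then st.2 + 1 else st.2))
    ([], running)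
  st.1.reverse

-- ===== PRECONDITION & SPEC =====
def Spec_hightMapGenerator (text : String) (out : List Int) : Prop := out = hightMapGenerator_alt text
instance (text : String) (out : List Int) : Decidable (Spec_hightMapGenerator text out) := by unfold Spec_hightMapGenerator; infer_instance

-- ===== CLAIM (what is proved, stated in full; the proofs are below) =====
def Claim_equal_hightMapGenerator : Prop := ∀ (text : String), Dom_hightMapGenerator text → Spec_hightMapGenerator text (hightMapGenerator text)

-- ===== LEMMAS AND PROOFS =====

-- per-character delta (proof-side reference only)
def pvDelta (c : Char) : Int := if c = '/' then 1 else if c = '\\' then -1 else 0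

-- reference ascending scan (what A computes)
def pvAccumulate (s : Int) : List Int → List Int
  | [] => []
  | d :: ds => (s + d) :: pvAccumulate (s + d) ds

-- reference descending scan (what B's reversed loop computes, before the final reverse)
def pvDesc (s : Int) : List Char → List Int
  | [] => []
  | c :: t => s :: pvDesc (s - pvDelta c) t

theorem pvAfold_eq (l : List Char) (acc : List Int) (h : Int) :
    (l.foldl
      (fun (st : List Int × Int) letter =>
        let hh := if letter = '\\' then st.2 - 1 else if letter = '/' then st.2 + 1 else st.2
        (st.1 ++ [hh], hh))
      (acc, h)).1 = acc ++ pvAccumulate h (l.map pvDelta) := by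
  induction l generalizing acc h with
  | nil => simp [pvAccumulate]
  | cons c cs ih =>
    simp only [List.foldl, List.map, pvAccumulate]
    rw [ih]
    have : (if c = '\\' then h - 1 else if c = '/' then h + 1 else h) = h + pvDelta c := by
      unfold pvDelta; split_ifs <;> simp_all <;> omega
    rw [this]
    simp

theorem pvBfold_eq (m : List Char) (acc : List Int) (s : Int) :
    (m.foldl
      (fun (st : List Int × Int) c =>
        (st.1 ++ [st.2],
         if c = '/' then st.2 - 1 else if c = '\\' then st.2 + 1 else st.2))
      (acc, s)).1 = acc ++ pvDesc s m := by
  induction m generalizing acc s with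
  | nil => simp [pvDesc]
  | cons c cs ih =>
    simp only [List.foldl, pvDesc]
    rw [ih]
    have : (if c = '/' then s - 1 else if c = '\\' then s + 1 else s) = s - pvDelta c := by
      unfold pvDelta; split_ifs <;> simp_all
    rw [this]
    simp

theorem pvDesc_append_singleton (m : List Char) (c : Char) (s : Int) :
    pvDesc s (m ++ [c]) = pvDesc s m ++ [s - (m.map pvDelta).sum] := by
  induction m generalizing s with
  | nil => simp [pvDesc]
  | cons d t ih =>
    simp only [List.cons_append, pvDesc, List.map, List.sum_cons, ih]
    simp
    ring_nf

theorem pvDesc_reverse (l : List Char) (h : Int) :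
    (pvDesc (h + (l.map pvDelta).sum) l.reverse).reverse = pvAccumulate h (l.map pvDelta) := by
  induction l generalizing h with
  | nil => simp [pvDesc, pvAccumulate]
  | cons c t ih =>
    simp only [List.reverse_cons, List.map, List.sum_cons, pvAccumulate]
    rw [pvDesc_append_singleton]
    have hs : (t.reverse.map pvDelta).sum = (t.map pvDelta).sum := by
      rw [List.map_reverse, List.sum_reverse]
    have h1 : h + (pvDelta c + (t.map pvDelta).sum) = (h + pvDelta c) + (t.map pvDelta).sum := by ring
    rw [hs, h1, List.reverse_append]
    simp only [List.reverse_cons, List.reverse_nil, List.nil_append, List.singleton_append]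
    have h2 : (h + pvDelta c) + (t.map pvDelta).sum - (t.map pvDelta).sum = h + pvDelta c := by ring
    rw [h2, ih (h + pvDelta c)]

-- singleton-substring count equals element count (no PySem lemma exists for this case)
theorem pvCountGo_singleton (c : Char) (l : List Char) (fuel acc : Nat) (hf : l.length ≤ fuel) :
    PySem.Chars.count.go [c] fuel l acc = acc + l.count c := by
  induction l generalizing fuel acc with
  | nil => cases fuel <;> simp [PySem.Chars.count.go]
  | cons d t ih =>
    cases fuel with
    | zero => simp at hf
    | succ n =>
      have hn : t.length ≤ n := by simpa using hf
      by_cases hd : d = c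
      · subst hd
        simp [PySem.Chars.count.go, List.isPrefixOf, ih _ _ hn, List.count_cons]
        omega
      · simp [PySem.Chars.count.go, List.isPrefixOf, hd, ih _ _ hn, Ne.symm hd]

theorem pvCount_singleton (c : Char) (l : List Char) :
    PySem.Chars.count l [c] = l.count c := by
  unfold PySem.Chars.count
  simp [pvCountGo_singleton c l l.length 0 le_rfl]

theorem pvSum_delta (l : List Char) :
    (l.map pvDelta).sum = (l.count '/' : Int) - (l.count '\\' : Int) := by
  induction l with
  | nil => simp
  | cons c t ih =>
    simp only [List.map, List.sum_cons, ih, List.count_cons]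
    unfold pvDelta
    by_cases h1 : c = '/'
    · subst h1; simp; ring
    · by_cases h2 : c = '\\'
      · subst h2; simp [h1]; ring
      · simp [h1, h2]

-- ===== VERDICT (by name: the statement is the Claim_ definition above) =====
theorem hightMapGenerator_spec : Claim_equal_hightMapGenerator := by
  intro text _
  unfold Spec_hightMapGenerator hightMapGenerator hightMapGenerator_alt
  rw [pvAfold_eq text.toList [] 0]
  simp only [pvBfold_eq, List.nil_append]
  have hc : (PySem.Str.count text "/" : Int) - (PySem.Str.count text "\\" : Int)
      = 0 + (text.toList.map pvDelta).sum := by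
    rw [PySem.Str.count_eq, PySem.Str.count_eq,
      show ("/".toList) = ['/'] from rfl, show ("\\".toList) = ['\\'] from rfl,
      pvCount_singleton, pvCount_singleton, pvSum_delta]
    ring
  rw [hc, pvDesc_reverse]
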